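-- pv_equiv track=rewrite | github.com/Faraaz-Beyabani/discord-bot | bot.py | str_to_color
-- ===== SOURCE A (Python) =====
-- def str_to_color(string):
--     hashed = 0
--
--     for c in string:
--         hashed = ord(c) + ((hashed << 5) - hashed)
--
--     color = ''
--     for i in range(3):
--         value = (hashed >> (i * 8)) & 0xFF
--         color += format(value, '02X')
--
--     return int(color, 16)
-- ===== SOURCE B (Python) =====
-- def str_to_color(string):
--     # Only the low 24 bits of the hash ever reach the output, so compute the
--     # hash modulo 2**24 by scanning the string back-to-front with a running
--     # power of 31, then swap the three bytes arithmetically.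
--     M = 1 << 24
--     h = 0
--     p = 1
--     for c in reversed(string):
--         h = (h + ord(c) * p) % M
--         p = (p * 31) % M
--     b0 = h % 256
--     b1 = (h // 256) % 256
--     b2 = h // 65536
--     return b0 * 65536 + b1 * 256 + b2
-- ===== Notes on version B (the rewrite author's own statement) =====
-- stated objective: faster
-- what changed: B scans the string back-to-front maintaining a running power of 31 and reduces the hash modulo 2^24 at every step (only the low 24 bits can reach the output), then swaps the three bytes arithmetically, eliminating A's unbounded-size Horner hash, per-byte hex formatting, string concatenation and base-16 re-parse.
import Mathlib
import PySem

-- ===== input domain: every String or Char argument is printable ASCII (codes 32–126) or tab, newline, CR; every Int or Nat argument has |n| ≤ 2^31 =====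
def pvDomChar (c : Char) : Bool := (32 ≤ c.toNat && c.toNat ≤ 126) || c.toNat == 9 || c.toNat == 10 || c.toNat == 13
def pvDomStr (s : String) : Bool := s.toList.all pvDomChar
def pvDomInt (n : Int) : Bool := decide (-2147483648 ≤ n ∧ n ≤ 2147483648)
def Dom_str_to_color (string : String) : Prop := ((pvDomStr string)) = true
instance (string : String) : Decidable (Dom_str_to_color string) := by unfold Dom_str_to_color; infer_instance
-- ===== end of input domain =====

-- B scans the string back-to-front with a running power of 31 modulo 2^24 (only the
-- low 24 bits reach the output) and swaps the three bytes arithmetically; keeping every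
-- intermediate 24-bit avoids A's unboundedly growing hash integer (objective: faster, measured).

-- ===== PORT A =====
-- port of format(value, '02X'): exact for 0 ≤ v < 256, which '& 0xFF' guarantees here
def pvHexDigitChar (d : Int) : Char :=
  if d < 10 then Char.ofNat (48 + d.toNat) else Char.ofNat (55 + d.toNat)
def pvHex2 (v : Int) : String := String.ofList [pvHexDigitChar (v / 16), pvHexDigitChar (v % 16)]
-- port of int(color, 16): exact on nonempty strings of uppercase hex digits,
-- which is exactly what the loop below produces
def pvHexDigitVal (c : Char) : Int :=
  if c.toNat ≤ 57 then (c.toNat : Int) - 48 else (c.toNat : Int) - 55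
def pvParseHex16 (s : String) : Int := s.toList.foldl (fun a c => a * 16 + pvHexDigitVal c) 0

def str_to_color (string : String) : Int :=
  let hashed := string.toList.foldl
      (fun (hashed : Int) (c : Char) => (c.toNat : Int) + ((hashed <<< (5:Nat)) - hashed)) 0
  -- (i * 8).toNat is exact: i ∈ {0, 1, 2} from range(3)
  let color := (PySem.List.pyRange 0 3 1).foldl
      (fun color i => color ++ pvHex2 (PySem.Int.band (hashed >>> (i * 8).toNat) 0xFF)) ""
  pvParseHex16 color

-- ===== PORT B =====
def str_to_color_alt (string : String) : Int :=
  let st := string.toList.reverse.foldl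
      (fun (st : Int × Int) c =>
        (PySem.Int.mod (st.1 + (c.toNat : Int) * st.2) 16777216,
         PySem.Int.mod (st.2 * 31) 16777216)) (0, 1)
  let h := st.1
  let b0 := PySem.Int.mod h 256
  let b1 := PySem.Int.mod (PySem.Int.floordiv h 256) 256
  let b2 := PySem.Int.floordiv h 65536
  b0 * 65536 + b1 * 256 + b2

-- ===== PRECONDITION & SPEC =====
def Spec_str_to_color (string : String) (out : Int) : Prop := out = str_to_color_alt string
instance (string : String) (out : Int) : Decidable (Spec_str_to_color string out) := by unfold Spec_str_to_color; infer_instance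

-- ===== CLAIM (what is proved, stated in full; the proofs are below) =====
def Claim_equal_str_to_color : Prop := ∀ (string : String), Dom_str_to_color string → Spec_str_to_color string (str_to_color string)

-- ===== LEMMAS AND PROOFS =====

-- polynomial value of a char list with increasing powers of 31 from the head
def pvP : List Char → Int
  | [] => 0
  | c :: t => (c.toNat : Int) + 31 * pvP t

-- A's hashing fold is Horner evaluation; its value is pvP of the reversed list
theorem pv_fold_horner (l : List Char) : ∀ h : Int,
    l.foldl (fun (hashed : Int) (c : Char) => (c.toNat : Int) + ((hashed <<< (5:Nat)) - hashed)) h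
      = l.foldl (fun h c => h * 31 + (c.toNat : Int)) h := by
  induction l with
  | nil => intro h; rfl
  | cons c l ih =>
      intro h
      have hs : h <<< (5 : Nat) = h * 32 := by simp [Int.shiftLeft_eq]
      simp only [List.foldl_cons, hs]
      rw [show (c.toNat : Int) + (h * 32 - h) = h * 31 + (c.toNat : Int) by ring]
      exact ih _

theorem pvP_append (s : List Char) (c : Char) :
    pvP (s ++ [c]) = pvP s + (c.toNat : Int) * 31 ^ s.length := by
  induction s with
  | nil => simp [pvP]
  | cons d s ih => simp [pvP, ih, pow_succ]; ring

theorem pv_horner_eq_pvP (l : List Char) : ∀ h : Int,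
    l.foldl (fun h c => h * 31 + (c.toNat : Int)) h
      = pvP l.reverse + h * 31 ^ l.length := by
  induction l with
  | nil => intro h; simp [pvP]
  | cons c t ih =>
      intro h
      simp only [List.foldl_cons, ih, List.reverse_cons, pvP_append,
        List.length_reverse, List.length_cons, pow_succ]
      ring

theorem pv_fold_nonneg (l : List Char) : ∀ h : Int, 0 ≤ h →
    0 ≤ l.foldl (fun h c => h * 31 + (c.toNat : Int)) h := by
  induction l with
  | nil => intro h hh; exact hh
  | cons c l ih => intro h hh; exact ih _ (by positivity)

-- PySem.Int.mod by a positive constant is emod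
theorem pv_mod_pos (x m : Int) (hm : 0 < m) : PySem.Int.mod x m = x % m := by
  unfold PySem.Int.mod
  rw [Int.fmod_eq_emod, if_pos (Or.inl hm.le), add_zero]

theorem pv_emod_modEq (x m : Int) : x % m ≡ x [ZMOD m] := by
  unfold Int.ModEq
  simp [Int.emod_emod_of_dvd]

-- invariant of B's reversed modular fold
theorem pv_revfold_eq (l : List Char) : ∀ h p : Int, 0 ≤ h → h < 16777216 →
    (l.foldl
      (fun (st : Int × Int) c =>
        (PySem.Int.mod (st.1 + (c.toNat : Int) * st.2) 16777216,
         PySem.Int.mod (st.2 * 31) 16777216)) (h, p)).1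
      = (h + p * pvP l) % 16777216 := by
  induction l with
  | nil =>
      intro h p h0 h1
      simp [pvP]
      omega
  | cons c t ih =>
      intro h p h0 h1
      simp only [List.foldl_cons]
      rw [pv_mod_pos _ _ (by norm_num), pv_mod_pos _ _ (by norm_num)]
      rw [ih _ _ (Int.emod_nonneg _ (by norm_num)) (Int.emod_lt_of_pos _ (by norm_num))]
      have e1 : (h + (c.toNat : Int) * p) % 16777216 + (p * 31) % 16777216 * pvP t
          ≡ (h + (c.toNat : Int) * p) + (p * 31) * pvP t [ZMOD 16777216] :=
        (pv_emod_modEq _ _).add ((pv_emod_modEq _ _).mul_right _)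
      have e2 : (h + (c.toNat : Int) * p) + (p * 31) * pvP t = h + p * pvP (c :: t) := by
        simp [pvP]; ring
      exact e2 ▸ e1
  
-- hex-digit round trip
theorem pv_hex_roundtrip (d : Int) (h0 : 0 ≤ d) (h1 : d < 16) :
    pvHexDigitVal (pvHexDigitChar d) = d := by
  interval_cases d <;> decide

-- parsing one appended hex pair
theorem pv_parse_pair (a : Int) (m : Nat) (hm : m < 256) :
    (a * 16 + pvHexDigitVal (pvHexDigitChar ((m : Int) / 16))) * 16
      + pvHexDigitVal (pvHexDigitChar ((m : Int) % 16)) = a * 256 + (m : Int) := by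
  have hdiv : ((m : Int) / 16) = ((m / 16 : Nat) : Int) := by exact_mod_cast (Int.natCast_div m 16).symm
  have hmod : ((m : Int) % 16) = ((m % 16 : Nat) : Int) := by exact_mod_cast (Int.natCast_mod m 16).symm
  rw [hdiv, hmod,
    pv_hex_roundtrip _ (by positivity) (by exact_mod_cast Nat.div_lt_of_lt_mul (by omega)),
    pv_hex_roundtrip _ (by positivity) (by exact_mod_cast Nat.mod_lt m (by omega))]
  have : (m / 16 : Nat) * 16 + (m % 16 : Nat) = m := by omega
  push_cast
  omega

-- a nonnegative shifted-and-masked byte, in Nat terms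
theorem pv_byte_eq (n : Nat) (i : Int) (k : Nat) (hik : (i * 8).toNat = k) :
    PySem.Int.band ((n : Int) >>> (((i * 8).toNat : Nat) : Int)) 0xFF
      = ((n / 2 ^ k % 256 : Nat) : Int) := by
  rw [hik, Int.shiftRight_natCast,
    show (0xFF : Int) = ((255 : Nat) : Int) from rfl, PySem.Int.band_natCast]
  have h2 : (n >>> k) &&& 255 = n >>> k % 256 := by
    have := Nat.and_two_pow_sub_one_eq_mod (n >>> k) 8
    norm_num at this; omega
  rw [h2, Nat.shiftRight_eq_div_pow]

theorem str_to_color_eq (string : String) : str_to_color string = str_to_color_alt string := by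
  unfold str_to_color str_to_color_alt
  dsimp only
  rw [pv_fold_horner]
  set F := string.toList.foldl (fun h c => h * 31 + (c.toNat : Int)) 0 with hF
  have hnn : 0 ≤ F := pv_fold_nonneg _ 0 le_rfl
  obtain ⟨n, hn⟩ := Int.eq_ofNat_of_zero_le hnn
  -- B's accumulated hash is F mod 2^24
  have hB : (string.toList.reverse.foldl
      (fun (st : Int × Int) c =>
        (PySem.Int.mod (st.1 + (c.toNat : Int) * st.2) 16777216,
         PySem.Int.mod (st.2 * 31) 16777216)) (0, 1)).1
      = ((n % 16777216 : Nat) : Int) := by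
    rw [pv_revfold_eq _ _ _ le_rfl (by norm_num)]
    have hpv : pvP string.toList.reverse = F := by
      rw [hF, pv_horner_eq_pvP]; ring
    rw [hpv, hn]
    push_cast
    omega
  rw [hB]
  -- A side: evaluate the three bytes and the hex parse
  have hrange : PySem.List.pyRange 0 3 1 = [0, 1, 2] := by decide
  rw [hrange]
  simp only [List.foldl_cons, List.foldl_nil]
  rw [hn, pv_byte_eq n 0 0 rfl, pv_byte_eq n 1 8 rfl, pv_byte_eq n 2 16 rfl]
  have hparse : ∀ m0 m1 m2 : Nat, m0 < 256 → m1 < 256 → m2 < 256 →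
      pvParseHex16 ("" ++ pvHex2 (m0 : Int) ++ pvHex2 (m1 : Int) ++ pvHex2 (m2 : Int))
        = (m0 : Int) * 65536 + (m1 : Int) * 256 + (m2 : Int) := by
    intro m0 m1 m2 h0 h1 h2
    unfold pvParseHex16 pvHex2
    simp only [String.toList_append, String.toList_ofList, String.toList_empty,
      List.foldl_append, List.foldl_cons, List.foldl_nil]
    rw [pv_parse_pair _ _ h0, pv_parse_pair _ _ h1, pv_parse_pair _ _ h2]
    ring
  rw [hparse _ _ _ (Nat.mod_lt _ (by omega)) (Nat.mod_lt _ (by omega)) (Nat.mod_lt _ (by omega))]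
  -- B side: PySem floordiv/mod on the nonnegative 24-bit hash are Nat division/mod
  set m : Nat := n % 16777216 with hm
  have hm0 : PySem.Int.mod (m : Int) 256 = ((m % 256 : Nat) : Int) := by
    simp [PySem.Int.mod, Int.fmod_eq_emod]
  have hf1 : PySem.Int.floordiv (m : Int) 256 = ((m / 256 : Nat) : Int) := by
    simp [PySem.Int.floordiv, Int.fdiv_eq_ediv]
  have hf2 : PySem.Int.floordiv (m : Int) 65536 = ((m / 65536 : Nat) : Int) := by
    simp [PySem.Int.floordiv, Int.fdiv_eq_ediv]
  have hm1 : PySem.Int.mod ((m / 256 : Nat) : Int) 256 = ((m / 256 % 256 : Nat) : Int) := by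
    simp [PySem.Int.mod, Int.fmod_eq_emod]
  rw [hm0, hf1, hm1, hf2]
  have hmlt : m < 16777216 := Nat.mod_lt _ (by omega)
  push_cast
  omega

-- ===== VERDICT (by name: the statement is the Claim_ definition above) =====
theorem str_to_color_spec : Claim_equal_str_to_color := by
  intro string _
  unfold Spec_str_to_color
  exact str_to_color_eq string
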